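-- pv_equiv track=rewrite | github.com/vaskoyudha/PosyanduDigital | worker/pipeline/table_detector.py | _assign_row_col
-- ===== SOURCE A (Python) =====
-- from typing import List, Dict, Any
--
-- def _assign_row_col(rects: List[tuple]) -> List[Dict[str, Any]]:
--     """Assign row/col indices by clustering y-coordinates."""
--     if not rects:
--         return []
--
--     rects_sorted = sorted(rects, key=lambda r: (r[1], r[0]))
--     rows: List[List[tuple]] = []
--     current_row: List[tuple] = [rects_sorted[0]]
--     row_y = rects_sorted[0][1]
--
--     for rect in rects_sorted[1:]:
--         if abs(rect[1] - row_y) < 15: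
--             current_row.append(rect)
--         else:
--             rows.append(sorted(current_row, key=lambda r: r[0]))
--             current_row = [rect]
--             row_y = rect[1]
--     rows.append(sorted(current_row, key=lambda r: r[0]))
--
--     cells: List[Dict[str, Any]] = []
--     for row_idx, row in enumerate(rows):
--         for col_idx, (x1, y1, x2, y2) in enumerate(row):
--             cells.append(
--                 {
--                     "row_idx": row_idx,
--                     "col_idx": col_idx,
--                     "x1": x1,
--                     "y1": y1,
--                     "x2": x2,
--                     "y2": y2,
--                 }
--             )
--     return cells
-- ===== SOURCE B (Python) =====
-- from typing import List, Dict, Any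
--
-- def _assign_row_col(rects: List[tuple]) -> List[Dict[str, Any]]:
--     """Assign row/col indices by peeling off the lowest-y band repeatedly.
--
--     No global sort: each row is the set of remaining rects whose y lies within
--     15 of the minimum remaining y (the clustering anchor is always the minimal
--     y, which is exactly the first-of-row y of the sorted formulation); only the
--     rects of one row are sorted, by (x1, y1).
--     """
--     cells: List[Dict[str, Any]] = []
--     remaining = list(rects)
--     row_idx = 0
--     while remaining:
--         ymin = min(r[1] for r in remaining)
--         row = [r for r in remaining if r[1] - ymin < 15]
--         remaining = [r for r in remaining if r[1] - ymin >= 15]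
--         for col_idx, (x1, y1, x2, y2) in enumerate(sorted(row, key=lambda r: (r[0], r[1]))):
--             cells.append(
--                 {
--                     "row_idx": row_idx,
--                     "col_idx": col_idx,
--                     "x1": x1,
--                     "y1": y1,
--                     "x2": x2,
--                     "y2": y2,
--                 }
--             )
--         row_idx += 1
--     return cells
-- ===== Notes on version B (the rewrite author's own statement) =====
-- stated objective: alternative
-- what changed: B never sorts the input globally and never clusters a sorted sequence: it repeatedly peels off the lowest y-band of the remaining rects (minimum remaining y, 15-tolerance split against that minimum) and sorts only that row by (x1, y1) before emitting its cells.
import Mathlib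
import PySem

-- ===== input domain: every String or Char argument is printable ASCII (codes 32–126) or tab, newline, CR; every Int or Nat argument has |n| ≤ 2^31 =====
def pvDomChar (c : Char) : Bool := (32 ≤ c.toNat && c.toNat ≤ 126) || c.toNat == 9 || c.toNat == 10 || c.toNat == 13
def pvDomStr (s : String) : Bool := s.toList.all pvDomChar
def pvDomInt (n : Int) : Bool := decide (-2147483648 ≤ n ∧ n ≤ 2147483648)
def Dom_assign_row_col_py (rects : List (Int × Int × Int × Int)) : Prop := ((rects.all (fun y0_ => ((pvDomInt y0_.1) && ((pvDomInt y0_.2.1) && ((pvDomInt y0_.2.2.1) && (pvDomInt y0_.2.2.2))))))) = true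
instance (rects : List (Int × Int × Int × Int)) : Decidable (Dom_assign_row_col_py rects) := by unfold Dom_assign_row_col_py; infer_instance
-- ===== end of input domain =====

-- B replaces A's sort-then-cluster pipeline: it repeatedly peels off the lowest y-band of the
-- remaining rects (minimum remaining y, 15-tolerance split against it) and sorts only that row,
-- by (x1, y1); same return value (alternative algorithm, no speed claim).

-- the cell dictionary literal (insertion-order association list), shared by both ports
def pvCell (ri ci : Int) (r : Int × Int × Int × Int) : List (String × Int) :=
  [("row_idx", ri), ("col_idx", ci), ("x1", r.1), ("y1", r.2.1), ("x2", r.2.2.1), ("y2", r.2.2.2)]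

-- ===== PORT A =====
-- state: (rows, current_row, row_y)
def pvAStep (st : List (List (Int × Int × Int × Int)) × List (Int × Int × Int × Int) × Int)
    (rect : Int × Int × Int × Int) :
    List (List (Int × Int × Int × Int)) × List (Int × Int × Int × Int) × Int :=
  if |rect.2.1 - st.2.2| < 15 then (st.1, st.2.1 ++ [rect], st.2.2)
  else (st.1 ++ [PySem.List.sorted st.2.1 (fun r => r.1) false], [rect], rect.2.1)

def assign_row_col_py (rects : List (Int × Int × Int × Int)) : List (List (String × Int)) :=
  if rects = [] then []
  else
    match PySem.List.sorted2 rects (fun r => r.2.1) (fun r => r.1) false with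
    | [] => []
    | r0 :: rest =>
      let st := rest.foldl pvAStep ([], [r0], r0.2.1)
      let rows := st.1 ++ [PySem.List.sorted st.2.1 (fun r => r.1) false]
      (PySem.List.enumerate rows 0).foldl
        (fun cells p =>
          (PySem.List.enumerate p.2 0).foldl (fun cs q => cs ++ [pvCell p.1 q.1 q.2]) cells) []

-- ===== PORT B =====
-- min(r[1] for r in remaining): the running-min loop over the y-coordinates
def pvMinY (r : Int × Int × Int × Int) (rest : List (Int × Int × Int × Int)) : Int :=
  (rest.map (fun t => t.2.1)).foldl min r.2.1

-- the running minimum is attained by some list element (needed by the port's termination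
-- argument, hence stated above the port)
theorem pvFoldlMinAttained (ys : List Int) : ∀ a : Int, ys.foldl min a = a ∨ ys.foldl min a ∈ ys := by
  induction ys with
  | nil => intro a; simp
  | cons y ys ih =>
    intro a
    rcases ih (min a y) with h | h
    · rcases min_choice a y with he | he
      · left; simp only [List.foldl_cons]; rw [h, he]
      · right; simp only [List.foldl_cons]; rw [h, he]; exact List.mem_cons_self ..
    · right; simp only [List.foldl_cons]; exact List.mem_cons_of_mem _ h

-- the non-band part is strictly shorter than the remaining list (termination of the while loop)
theorem pvRestLen (r : Int × Int × Int × Int) (rest : List (Int × Int × Int × Int)) :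
    ((r :: rest).filter (fun t => decide (15 ≤ t.2.1 - pvMinY r rest))).length ≤ rest.length := by
  have hwit : ∃ t ∈ r :: rest, ¬ (15 ≤ t.2.1 - pvMinY r rest) := by
    unfold pvMinY
    rcases pvFoldlMinAttained (rest.map (fun t => t.2.1)) r.2.1 with h | h
    · exact ⟨r, by simp, by omega⟩
    · rcases List.mem_map.mp h with ⟨t, ht, hty⟩
      exact ⟨t, by simp [ht], by omega⟩
  rcases hwit with ⟨t, ht, hnt⟩
  have h1 : ((r :: rest).filter (fun t => decide (15 ≤ t.2.1 - pvMinY r rest))).length ≤ (r :: rest).length :=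
    List.length_filter_le _ _
  rcases Nat.lt_or_ge ((r :: rest).filter (fun t => decide (15 ≤ t.2.1 - pvMinY r rest))).length (r :: rest).length with h | h
  · simpa using Nat.lt_succ_iff.mp (by simpa using h)
  · exfalso
    have := List.length_filter_eq_length_iff.mp (le_antisymm h1 h)
    exact hnt (by simpa using this t ht)

-- the while-loop of B: peel off the lowest band of the remaining rects
def pvAltLoop (remaining : List (Int × Int × Int × Int)) (i : Int) : List (List (String × Int)) :=
  match remaining with
  | [] => []
  | r :: rest =>
    let m := pvMinY r rest
    let row := (r :: rest).filter (fun t => decide (t.2.1 - m < 15))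
    let rest' := (r :: rest).filter (fun t => decide (15 ≤ t.2.1 - m))
    ((PySem.List.enumerate (PySem.List.sorted2 row (fun t => t.1) (fun t => t.2.1) false) 0).foldl
      (fun cs q => cs ++ [pvCell i q.1 q.2]) []) ++ pvAltLoop rest' (i + 1)
termination_by remaining.length
decreasing_by
  simp_wf
  exact pvRestLen r rest

def assign_row_col_py_alt (rects : List (Int × Int × Int × Int)) : List (List (String × Int)) :=
  pvAltLoop rects 0

-- ===== PRECONDITION & SPEC =====
def Spec_assign_row_col_py (rects : List (Int × Int × Int × Int)) (out : List (List (String × Int))) : Prop := out = assign_row_col_py_alt rects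
instance (rects : List (Int × Int × Int × Int)) (out : List (List (String × Int))) : Decidable (Spec_assign_row_col_py rects out) := by unfold Spec_assign_row_col_py; infer_instance

-- ===== CLAIM (what is proved, stated in full; the proofs are below) =====
def Claim_equal_assign_row_col_py : Prop := ∀ (rects : List (Int × Int × Int × Int)), Dom_assign_row_col_py rects → Spec_assign_row_col_py rects (assign_row_col_py rects)

-- ===== LEMMAS AND PROOFS =====

-- the three comparators of the insertion sorts involved: (y,x) lex, x alone, (x,y) lex
def pvB1 (a c : Int × Int × Int × Int) : Bool :=
  decide (a.2.1 < c.2.1) || (!decide (c.2.1 < a.2.1) && decide (a.1 < c.1))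
def pvB2 (a c : Int × Int × Int × Int) : Bool := decide (a.1 < c.1)
def pvB3 (a c : Int × Int × Int × Int) : Bool :=
  decide (a.1 < c.1) || (!decide (c.1 < a.1) && decide (a.2.1 < c.2.1))

def pvIsort (b : (Int × Int × Int × Int) → (Int × Int × Int × Int) → Bool)
    (l : List (Int × Int × Int × Int)) : List (Int × Int × Int × Int) :=
  l.foldl (fun acc x => PySem.List.insertBy b x acc) []

theorem pvS1_eq (l : List (Int × Int × Int × Int)) :
    PySem.List.sorted2 l (fun r => r.2.1) (fun r => r.1) false = pvIsort pvB1 l := rfl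
theorem pvS3_eq (l : List (Int × Int × Int × Int)) :
    PySem.List.sorted2 l (fun r => r.1) (fun r => r.2.1) false = pvIsort pvB3 l := rfl

-- abstract clustering of A: list of rows in encounter order (unsorted rows)
def pvCluster (cur : List (Int × Int × Int × Int)) (y : Int) :
    List (Int × Int × Int × Int) → List (List (Int × Int × Int × Int))
  | [] => [cur]
  | r :: rest =>
    if |r.2.1 - y| < 15 then pvCluster (cur ++ [r]) y rest
    else cur :: pvCluster [r] r.2.1 rest

def pvSortX (b : List (Int × Int × Int × Int)) : List (Int × Int × Int × Int) :=
  PySem.List.sorted b (fun r => r.1) false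

-- the emitted cells of one row / of a row list
def pvEmitRow (ri c : Int) : List (Int × Int × Int × Int) → List (List (String × Int))
  | [] => []
  | r :: rs => pvCell ri c r :: pvEmitRow ri (c + 1) rs

def pvEmitRows (i : Int) : List (List (Int × Int × Int × Int)) → List (List (String × Int))
  | [] => []
  | b :: bs => pvEmitRow i 0 b ++ pvEmitRows (i + 1) bs

-- ---- A-side characterisations ----

theorem pvAFold (rest : List (Int × Int × Int × Int)) :
    ∀ rows cur y,
      (rest.foldl pvAStep (rows, cur, y)).1 ++
        [pvSortX (rest.foldl pvAStep (rows, cur, y)).2.1] =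
      rows ++ (pvCluster cur y rest).map pvSortX := by
  induction rest with
  | nil => intro rows cur y; simp [pvCluster, pvSortX]
  | cons r rest ih =>
    intro rows cur y
    by_cases h : |r.2.1 - y| < 15
    · simp only [List.foldl_cons, pvAStep, if_pos h, pvCluster]
      exact ih rows (cur ++ [r]) y
    · simp only [List.foldl_cons, pvAStep, if_neg h, pvCluster]
      rw [ih]
      simp [pvSortX]

theorem pvEmitInner (row : List (Int × Int × Int × Int)) :
    ∀ (ri c : Int) (cells : List (List (String × Int))),
      (PySem.List.enumerate row c).foldl (fun cs q => cs ++ [pvCell ri q.1 q.2]) cells =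
        cells ++ pvEmitRow ri c row := by
  induction row with
  | nil => intro ri c cells; simp [PySem.List.enumerate, pvEmitRow]
  | cons r rs ih =>
    intro ri c cells
    rw [PySem.List.enumerate_cons]
    simp only [List.foldl_cons]
    rw [ih]
    simp [pvEmitRow]

theorem pvEmitOuter (rows : List (List (Int × Int × Int × Int))) :
    ∀ (i : Int) (cells : List (List (String × Int))),
      (PySem.List.enumerate rows i).foldl
        (fun cells p =>
          (PySem.List.enumerate p.2 0).foldl (fun cs q => cs ++ [pvCell p.1 q.1 q.2]) cells)
        cells =
      cells ++ pvEmitRows i rows := by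
  induction rows with
  | nil => intro i cells; simp [PySem.List.enumerate, pvEmitRows]
  | cons b bs ih =>
    intro i cells
    rw [PySem.List.enumerate_cons]
    simp only [List.foldl_cons]
    rw [pvEmitInner, ih]
    simp [pvEmitRows]

-- ---- generic insertion-sort structure lemmas ----

-- a sorted accumulator stays sorted under insertBy (b asymmetric and 'transitive across a gap')
theorem pvInsPairwise {b : (Int × Int × Int × Int) → (Int × Int × Int × Int) → Bool}
    (hA : ∀ p q, b p q = true → b q p = false)
    (hT : ∀ x v0 v, b x v0 = true → b v v0 = false → b v x = false)
    (x : Int × Int × Int × Int) :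
    ∀ ys : List (Int × Int × Int × Int), ys.Pairwise (fun p q => b q p = false) →
      (PySem.List.insertBy b x ys).Pairwise (fun p q => b q p = false) := by
  intro ys
  induction ys with
  | nil => intro _; simp [PySem.List.insertBy]
  | cons y ys ih =>
    intro hp
    by_cases h : b x y = true
    · simp only [PySem.List.insertBy, h, if_true]
      refine List.Pairwise.cons ?_ hp
      intro z hz
      rcases List.mem_cons.mp hz with rfl | hz
      · exact hA _ _ h
      · exact hT x y z h ((List.pairwise_cons.mp hp).1 z hz)
    · simp only [PySem.List.insertBy, h]
      refine List.Pairwise.cons ?_ (ih (List.pairwise_cons.mp hp).2)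
      intro z hz
      rcases (PySem.List.mem_insertBy _ _ _ _).mp hz with rfl | hz
      · simpa using h
      · exact (List.pairwise_cons.mp hp).1 z hz

theorem pvFoldPairwise {b : (Int × Int × Int × Int) → (Int × Int × Int × Int) → Bool}
    (hA : ∀ p q, b p q = true → b q p = false)
    (hT : ∀ x v0 v, b x v0 = true → b v v0 = false → b v x = false) :
    ∀ (l acc : List (Int × Int × Int × Int)), acc.Pairwise (fun p q => b q p = false) →
      (l.foldl (fun a x => PySem.List.insertBy b x a) acc).Pairwise (fun p q => b q p = false) := by
  intro l
  induction l with
  | nil => intro acc h; simpa using h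
  | cons x l ih =>
    intro acc h
    simp only [List.foldl_cons]
    exact ih _ (pvInsPairwise hA hT x acc h)

theorem pvIsortPairwise {b : (Int × Int × Int × Int) → (Int × Int × Int × Int) → Bool}
    (hA : ∀ p q, b p q = true → b q p = false)
    (hT : ∀ x v0 v, b x v0 = true → b v v0 = false → b v x = false)
    (l : List (Int × Int × Int × Int)) :
    (pvIsort b l).Pairwise (fun p q => b q p = false) :=
  pvFoldPairwise hA hT l [] (by simp)

-- insertBy splits its target: ys = U ++ V, result U ++ x :: V, x not-before U, x before V's head
theorem pvInsDecomp (b : (Int × Int × Int × Int) → (Int × Int × Int × Int) → Bool)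
    (x : Int × Int × Int × Int) :
    ∀ ys : List (Int × Int × Int × Int),
      ∃ U V, ys = U ++ V ∧ PySem.List.insertBy b x ys = U ++ x :: V ∧
        (∀ u ∈ U, b x u = false) ∧ (∀ v0 ∈ V.head?, b x v0 = true) := by
  intro ys
  induction ys with
  | nil => exact ⟨[], [], by simp, by simp [PySem.List.insertBy], by simp, by simp⟩
  | cons y ys ih =>
    by_cases h : b x y = true
    · exact ⟨[], y :: ys, by simp, by simp [PySem.List.insertBy, h], by simp, by simpa using h⟩
    · rcases ih with ⟨U, V, h1, h2, h3, h4⟩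
      refine ⟨y :: U, V, by simp [h1], ?_, ?_, h4⟩
      · simp only [PySem.List.insertBy, h]
        simp [h2]
      · intro u hu
        rcases List.mem_cons.mp hu with rfl | hu
        · simpa using h
        · exact h3 u hu

theorem pvInsPerm (b : (Int × Int × Int × Int) → (Int × Int × Int × Int) → Bool)
    (x : Int × Int × Int × Int) (ys : List (Int × Int × Int × Int)) :
    (PySem.List.insertBy b x ys).Perm (x :: ys) := by
  rcases pvInsDecomp b x ys with ⟨U, V, h1, h2, _, _⟩
  subst h1
  rw [h2]
  exact List.perm_middle

theorem pvFoldPerm (b : (Int × Int × Int × Int) → (Int × Int × Int × Int) → Bool) :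
    ∀ (l acc : List (Int × Int × Int × Int)),
      (l.foldl (fun a x => PySem.List.insertBy b x a) acc).Perm (acc ++ l) := by
  intro l
  induction l with
  | nil => intro acc; simp
  | cons x l ih =>
    intro acc
    simp only [List.foldl_cons]
    exact (ih _).trans (((pvInsPerm b x acc).append_right l).trans List.perm_middle.symm)

theorem pvIsortPerm (b : (Int × Int × Int × Int) → (Int × Int × Int × Int) → Bool)
    (l : List (Int × Int × Int × Int)) : (pvIsort b l).Perm l := by
  simpa using pvFoldPerm b l []

theorem pvInsCongr (b b' : (Int × Int × Int × Int) → (Int × Int × Int × Int) → Bool)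
    (x : Int × Int × Int × Int) :
    ∀ ys : List (Int × Int × Int × Int), (∀ y ∈ ys, b x y = b' x y) →
      PySem.List.insertBy b x ys = PySem.List.insertBy b' x ys := by
  intro ys
  induction ys with
  | nil => intro _; rfl
  | cons y ys ih =>
    intro h
    have hy : b x y = b' x y := h y (by simp)
    simp only [PySem.List.insertBy, hy]
    by_cases hc : b' x y = true
    · simp [hc]
    · simp only [hc]
      rw [ih (fun z hz => h z (by simp [hz]))]

-- ---- comparator arithmetic facts ----

theorem pvB1_asym : ∀ p q, pvB1 p q = true → pvB1 q p = false := by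
  intro p q; simp [pvB1]; omega

theorem pvB1_gap : ∀ x v0 v, pvB1 x v0 = true → pvB1 v v0 = false → pvB1 v x = false := by
  intro x v0 v; simp [pvB1]; omega

theorem pvB1_gap' : ∀ x v0 v, pvB1 x v0 = true → pvB1 v v0 = false → pvB1 x v = true := by
  intro x v0 v; simp [pvB1]; omega

theorem pvB23_eq (a w : Int × Int × Int × Int) (h : pvB1 a w = false) : pvB2 a w = pvB3 a w := by
  simp only [pvB1] at h
  simp only [pvB2, pvB3]
  simp at h ⊢
  omega

-- ---- commuting an insert-by-x with an insert-by-(x,y) (the heart of the stability argument) ----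

theorem pvInsPos {b : (Int × Int × Int × Int) → (Int × Int × Int × Int) → Bool}
    {x y : Int × Int × Int × Int} {ys : List (Int × Int × Int × Int)} (h : b x y = true) :
    PySem.List.insertBy b x (y :: ys) = x :: y :: ys := by
  simp [PySem.List.insertBy, h]

theorem pvInsNeg {b : (Int × Int × Int × Int) → (Int × Int × Int × Int) → Bool}
    {x y : Int × Int × Int × Int} {ys : List (Int × Int × Int × Int)} (h : b x y = false) :
    PySem.List.insertBy b x (y :: ys) = y :: PySem.List.insertBy b x ys := by
  simp [PySem.List.insertBy, h]

theorem pvInsComm (a v : Int × Int × Int × Int)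
    (h1 : a.2.1 < v.2.1 ∨ (a.2.1 = v.2.1 ∧ a.1 < v.1)) :
    ∀ W : List (Int × Int × Int × Int),
      PySem.List.insertBy pvB2 v (PySem.List.insertBy pvB3 a W) =
        PySem.List.insertBy pvB3 a (PySem.List.insertBy pvB2 v W) := by
  intro W
  induction W with
  | nil =>
    rw [show PySem.List.insertBy pvB3 a ([] : List (Int × Int × Int × Int)) = [a] from rfl,
      show PySem.List.insertBy pvB2 v ([] : List (Int × Int × Int × Int)) = [v] from rfl]
    by_cases h : v.1 < a.1
    · have h2 : pvB2 v a = true := by simp [pvB2]; omega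
      have h3 : pvB3 a v = false := by simp [pvB3]; omega
      rw [pvInsPos h2, pvInsNeg h3]
      rfl
    · have h2 : pvB2 v a = false := by simp [pvB2]; omega
      have h3 : pvB3 a v = true := by simp [pvB3]; omega
      rw [pvInsNeg h2, pvInsPos h3]
      rfl
  | cons w W ih =>
    by_cases f3 : pvB3 a w = true
    · rw [pvInsPos f3]
      by_cases f2 : pvB2 v w = true
      · rw [pvInsPos f2]
        by_cases h : v.1 < a.1
        · have h2 : pvB2 v a = true := by simp [pvB2]; omega
          have h3 : pvB3 a v = false := by simp [pvB3]; omega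
          rw [pvInsPos h2, pvInsNeg h3, pvInsPos f3]
        · have h2 : pvB2 v a = false := by simp [pvB2]; omega
          have h3 : pvB3 a v = true := by simp [pvB3]; omega
          rw [pvInsNeg h2, pvInsPos f2, pvInsPos h3]
      · have f2' : pvB2 v w = false := by simpa using f2
        have haw : ¬ (w.1 < a.1) ∧ (a.1 < w.1 ∨ a.2.1 < w.2.1) := by
          simp [pvB3] at f3; omega
        have hvw : ¬ (v.1 < w.1) := by simpa [pvB2] using f2
        have h2 : pvB2 v a = false := by simp [pvB2]; omega
        have h3 : pvB3 a v = true := by simp [pvB3]; omega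
        rw [pvInsNeg h2, pvInsNeg f2', pvInsPos f3]
    · have f3' : pvB3 a w = false := by simpa using f3
      rw [pvInsNeg f3']
      by_cases f2 : pvB2 v w = true
      · have hvw : v.1 < w.1 := by simpa [pvB2] using f2
        have haw : ¬ (a.1 < w.1) ∧ (w.1 < a.1 ∨ ¬ (a.2.1 < w.2.1)) := by
          simp [pvB3] at f3'; omega
        have h3 : pvB3 a v = false := by simp [pvB3]; omega
        rw [pvInsPos f2, pvInsPos f2, pvInsNeg h3, pvInsNeg f3']
      · have f2' : pvB2 v w = false := by simpa using f2
        rw [pvInsNeg f2', pvInsNeg f2', pvInsNeg f3', ih]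

-- insert at the front when x is before the head
theorem pvInsFront (b : (Int × Int × Int × Int) → (Int × Int × Int × Int) → Bool)
    (x : Int × Int × Int × Int) (L : List (Int × Int × Int × Int))
    (h : ∀ z0 ∈ L.head?, b x z0 = true) : PySem.List.insertBy b x L = x :: L := by
  cases L with
  | nil => rfl
  | cons z L => simp [PySem.List.insertBy, h z (by simp)]

-- ---- the two-sort composition: sort by x after sort by (y,x) = sort by (x,y) ----

theorem pvBridge (a : Int × Int × Int × Int) (S1 : List (Int × Int × Int × Int))
    (hp : S1.Pairwise (fun p q => pvB1 q p = false)) :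
    pvIsort pvB2 (PySem.List.insertBy pvB1 a S1) =
      PySem.List.insertBy pvB3 a (pvIsort pvB2 S1) := by
  rcases pvInsDecomp pvB1 a S1 with ⟨U, V, h1, h2, h3, h4⟩
  have hWU : ∀ w ∈ U.foldl (fun acc x => PySem.List.insertBy pvB2 x acc) [], w ∈ U := by
    intro w hw
    have := (pvFoldPerm pvB2 U []).mem_iff.mp hw
    simpa using this
  have step1 : PySem.List.insertBy pvB2 a (U.foldl (fun acc x => PySem.List.insertBy pvB2 x acc) []) =
      PySem.List.insertBy pvB3 a (U.foldl (fun acc x => PySem.List.insertBy pvB2 x acc) []) := by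
    apply pvInsCongr
    intro w hw
    exact pvB23_eq a w (h3 w (hWU w hw))
  have hVall : ∀ v ∈ V, pvB1 a v = true := by
    cases V with
    | nil => simp
    | cons v0 V' =>
      have hv0 : pvB1 a v0 = true := h4 v0 (by simp)
      intro v hv
      rcases List.mem_cons.mp hv with rfl | hv
      · exact hv0
      · have hpv : pvB1 v v0 = false := by
          rw [h1] at hp
          have := (List.pairwise_append.mp hp).2.1
          exact (List.pairwise_cons.mp this).1 v hv
        exact pvB1_gap' a v0 v hv0 hpv
  have step2 : ∀ (V' : List (Int × Int × Int × Int)) (W : List (Int × Int × Int × Int)),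
      (∀ v ∈ V', pvB1 a v = true) →
      V'.foldl (fun acc x => PySem.List.insertBy pvB2 x acc) (PySem.List.insertBy pvB3 a W) =
        PySem.List.insertBy pvB3 a (V'.foldl (fun acc x => PySem.List.insertBy pvB2 x acc) W) := by
    intro V'
    induction V' with
    | nil => intro W _; simp
    | cons v V' ih =>
      intro W hall
      have hv : pvB1 a v = true := hall v (by simp)
      have hv' : a.2.1 < v.2.1 ∨ (a.2.1 = v.2.1 ∧ a.1 < v.1) := by
        simp [pvB1] at hv; omega
      simp only [List.foldl_cons]
      rw [pvInsComm a v hv' W]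
      exact ih _ (fun z hz => hall z (by simp [hz]))
  calc pvIsort pvB2 (PySem.List.insertBy pvB1 a S1)
      = (U ++ a :: V).foldl (fun acc x => PySem.List.insertBy pvB2 x acc) [] := by rw [h2]; rfl
    _ = V.foldl (fun acc x => PySem.List.insertBy pvB2 x acc)
          (PySem.List.insertBy pvB2 a (U.foldl (fun acc x => PySem.List.insertBy pvB2 x acc) [])) := by
        rw [List.foldl_append]; rfl
    _ = V.foldl (fun acc x => PySem.List.insertBy pvB2 x acc)
          (PySem.List.insertBy pvB3 a (U.foldl (fun acc x => PySem.List.insertBy pvB2 x acc) [])) := by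
        rw [step1]
    _ = PySem.List.insertBy pvB3 a
          ((U ++ V).foldl (fun acc x => PySem.List.insertBy pvB2 x acc) []) := by
        rw [step2 V _ hVall, List.foldl_append]
    _ = PySem.List.insertBy pvB3 a (pvIsort pvB2 S1) := by rw [h1]; rfl

theorem pvSortSwap : ∀ l : List (Int × Int × Int × Int),
    pvIsort pvB2 (pvIsort pvB1 l) = pvIsort pvB3 l := by
  intro l
  induction l using List.reverseRecOn with
  | nil => rfl
  | append_singleton l a ih =>
    have h1 : pvIsort pvB1 (l ++ [a]) = PySem.List.insertBy pvB1 a (pvIsort pvB1 l) := by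
      simp [pvIsort, List.foldl_append]
    have h3 : pvIsort pvB3 (l ++ [a]) = PySem.List.insertBy pvB3 a (pvIsort pvB3 l) := by
      simp [pvIsort, List.foldl_append]
    rw [h1, h3, pvBridge a _ (pvIsortPairwise pvB1_asym pvB1_gap l), ih]

-- ---- filter commutes with the (y,x) insertion sort (stability) ----

theorem pvFilterIns (p : (Int × Int × Int × Int) → Bool) (x : Int × Int × Int × Int) :
    ∀ ys : List (Int × Int × Int × Int), ys.Pairwise (fun u w => pvB1 w u = false) →
      (PySem.List.insertBy pvB1 x ys).filter p =
        if p x then PySem.List.insertBy pvB1 x (ys.filter p) else ys.filter p := by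
  intro ys
  induction ys with
  | nil => intro _; by_cases hx : p x <;> simp [PySem.List.insertBy, hx]
  | cons y ys ih =>
    intro hp
    by_cases hb : pvB1 x y = true
    · rw [show PySem.List.insertBy pvB1 x (y :: ys) = x :: y :: ys by
        simp [PySem.List.insertBy, hb]]
      by_cases hx : p x
      · rw [List.filter_cons_of_pos (by simp [hx]), if_pos hx]
        rw [pvInsFront]
        intro z0 hz0
        have hz0m : z0 ∈ (y :: ys).filter p := List.mem_of_mem_head? hz0
        rcases List.mem_cons.mp (List.mem_of_mem_filter hz0m) with rfl | hz
        · exact hb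
        · exact pvB1_gap' x y z0 hb ((List.pairwise_cons.mp hp).1 z0 hz)
      · rw [List.filter_cons_of_neg (by simp [hx]), if_neg hx]
    · rw [show PySem.List.insertBy pvB1 x (y :: ys) = y :: PySem.List.insertBy pvB1 x ys by
        simp [PySem.List.insertBy, hb]]
      have ih' := ih (List.pairwise_cons.mp hp).2
      by_cases hx : p x <;> by_cases hy : p y
      · rw [List.filter_cons_of_pos (by simp [hy]), ih', if_pos hx, if_pos hx,
          List.filter_cons_of_pos (by simp [hy])]
        rw [show PySem.List.insertBy pvB1 x (y :: ys.filter p) =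
            y :: PySem.List.insertBy pvB1 x (ys.filter p) by simp [PySem.List.insertBy, hb]]
      · rw [List.filter_cons_of_neg (by simp [hy]), ih', if_pos hx, if_pos hx,
          List.filter_cons_of_neg (by simp [hy])]
      · rw [List.filter_cons_of_pos (by simp [hy]), ih', if_neg hx, if_neg hx,
          List.filter_cons_of_pos (by simp [hy])]
      · rw [List.filter_cons_of_neg (by simp [hy]), ih', if_neg hx, if_neg hx,
          List.filter_cons_of_neg (by simp [hy])]

theorem pvFilterFold (p : (Int × Int × Int × Int) → Bool) :
    ∀ (l acc : List (Int × Int × Int × Int)), acc.Pairwise (fun u w => pvB1 w u = false) →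
      (l.foldl (fun a x => PySem.List.insertBy pvB1 x a) acc).filter p =
        (l.filter p).foldl (fun a x => PySem.List.insertBy pvB1 x a) (acc.filter p) := by
  intro l
  induction l with
  | nil => intro acc _; simp
  | cons x l ih =>
    intro acc hp
    simp only [List.foldl_cons]
    rw [ih _ (pvInsPairwise pvB1_asym pvB1_gap x acc hp), pvFilterIns p x acc hp]
    by_cases hx : p x
    · rw [List.filter_cons_of_pos (by simp [hx]), if_pos hx]; rfl
    · rw [List.filter_cons_of_neg (by simp [hx]), if_neg hx]

theorem pvFilterIsort (p : (Int × Int × Int × Int) → Bool) (l : List (Int × Int × Int × Int)) :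
    (pvIsort pvB1 l).filter p = pvIsort pvB1 (l.filter p) := by
  simpa using pvFilterFold p l [] (by simp)

-- ---- filters on a y-sorted list are takeWhile/dropWhile ----

theorem pvFilterTakeDrop (c : Int) :
    ∀ S : List (Int × Int × Int × Int), S.Pairwise (fun u w => u.2.1 ≤ w.2.1) →
      S.filter (fun t => decide (t.2.1 < c)) = S.takeWhile (fun t => decide (t.2.1 < c)) ∧
      S.filter (fun t => !decide (t.2.1 < c)) = S.dropWhile (fun t => decide (t.2.1 < c)) := by
  intro S
  induction S with
  | nil => intro _; simp
  | cons s S ih =>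
    intro hp
    rcases ih (List.pairwise_cons.mp hp).2 with ⟨ih1, ih2⟩
    by_cases hs : s.2.1 < c
    · rw [List.filter_cons_of_pos (by simp [hs]), List.takeWhile_cons_of_pos (by simp [hs]),
        List.filter_cons_of_neg (by simp [hs]), List.dropWhile_cons_of_pos (by simp [hs])]
      exact ⟨by rw [ih1], ih2⟩
    · constructor
      · rw [List.takeWhile_cons_of_neg (by simp [hs])]
        apply List.filter_eq_nil_iff.mpr
        intro t ht
        rcases List.mem_cons.mp ht with rfl | ht
        · simp [hs]
        · have := (List.pairwise_cons.mp hp).1 t ht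
          simp; omega
      · rw [List.dropWhile_cons_of_neg (by simp [hs])]
        apply List.filter_eq_self.mpr
        intro t ht
        rcases List.mem_cons.mp ht with rfl | ht
        · simp [hs]
        · have := (List.pairwise_cons.mp hp).1 t ht
          simp; omega

-- ---- A's clustering of a y-sorted list is the min-band peeling ----

def pvRows : List (Int × Int × Int × Int) → List (List (Int × Int × Int × Int))
  | [] => []
  | s :: t =>
    (s :: t.takeWhile (fun u => decide (u.2.1 < s.2.1 + 15))) ::
      pvRows (t.dropWhile (fun u => decide (u.2.1 < s.2.1 + 15)))
termination_by S => S.length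
decreasing_by
  simp_wf
  exact (List.dropWhile_sublist _).length_le

theorem pvRows_nil : pvRows [] = [] := by rw [pvRows]

theorem pvRows_cons (s : Int × Int × Int × Int) (t : List (Int × Int × Int × Int)) :
    pvRows (s :: t) =
      (s :: t.takeWhile (fun u => decide (u.2.1 < s.2.1 + 15))) ::
        pvRows (t.dropWhile (fun u => decide (u.2.1 < s.2.1 + 15))) := by
  rw [pvRows]

theorem pvClusterRows :
    ∀ (rest : List (Int × Int × Int × Int)) (cur : List (Int × Int × Int × Int)) (y0 : Int),
      rest.Pairwise (fun u w => u.2.1 ≤ w.2.1) → (∀ r ∈ rest, y0 ≤ r.2.1) →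
      pvCluster cur y0 rest =
        (cur ++ rest.takeWhile (fun u => decide (u.2.1 < y0 + 15))) ::
          pvRows (rest.dropWhile (fun u => decide (u.2.1 < y0 + 15))) := by
  intro rest
  induction rest with
  | nil => intro cur y0 _ _; simp [pvCluster, pvRows_nil]
  | cons r rest ih =>
    intro cur y0 hp hy
    have hry : y0 ≤ r.2.1 := hy r (by simp)
    have habs : |r.2.1 - y0| = r.2.1 - y0 := abs_of_nonneg (by omega)
    by_cases h : |r.2.1 - y0| < 15
    · have hr : r.2.1 < y0 + 15 := by rw [habs] at h; omega
      rw [List.takeWhile_cons_of_pos (by simp [hr]), List.dropWhile_cons_of_pos (by simp [hr])]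
      simp only [pvCluster, if_pos h]
      rw [ih (cur ++ [r]) y0 (List.pairwise_cons.mp hp).2 (fun t ht => hy t (by simp [ht]))]
      simp
    · have hr : ¬ (r.2.1 < y0 + 15) := by rw [habs] at h; omega
      rw [List.takeWhile_cons_of_neg (by simp [hr]), List.dropWhile_cons_of_neg (by simp [hr])]
      simp only [pvCluster, if_neg h]
      rw [ih [r] r.2.1 (List.pairwise_cons.mp hp).2 (fun t ht => (List.pairwise_cons.mp hp).1 t ht)]
      rw [pvRows_cons]
      simp

-- ---- the head of the (y,x)-sorted list carries the minimum y ----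

theorem pvFoldlMinLe (ys : List Int) : ∀ a : Int, ys.foldl min a ≤ a ∧ ∀ x ∈ ys, ys.foldl min a ≤ x := by
  induction ys with
  | nil => intro a; simp
  | cons y ys ih =>
    intro a
    rcases ih (min a y) with ⟨h1, h2⟩
    constructor
    · simp only [List.foldl_cons]; exact le_trans h1 (min_le_left a y)
    · intro x hx
      rcases List.mem_cons.mp hx with rfl | hx
      · simp only [List.foldl_cons]; exact le_trans h1 (min_le_right a x)
      · simpa using h2 x hx

theorem pvMinYHead (r : Int × Int × Int × Int) (rest : List (Int × Int × Int × Int))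
    (s0 : Int × Int × Int × Int) (tS : List (Int × Int × Int × Int))
    (hS : pvIsort pvB1 (r :: rest) = s0 :: tS) : pvMinY r rest = s0.2.1 := by
  have hperm : (s0 :: tS).Perm (r :: rest) := hS ▸ pvIsortPerm pvB1 (r :: rest)
  have hpw : (s0 :: tS).Pairwise (fun p q => pvB1 q p = false) :=
    hS ▸ pvIsortPairwise pvB1_asym pvB1_gap (r :: rest)
  have hs0min : ∀ t ∈ s0 :: tS, s0.2.1 ≤ t.2.1 := by
    intro t ht
    rcases List.mem_cons.mp ht with rfl | ht
    · exact le_refl _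
    · have := (List.pairwise_cons.mp hpw).1 t ht
      simp [pvB1] at this; omega
  have hlow : pvMinY r rest ≤ r.2.1 ∧ ∀ t ∈ rest, pvMinY r rest ≤ t.2.1 := by
    rcases pvFoldlMinLe (rest.map (fun t => t.2.1)) r.2.1 with ⟨h1, h2⟩
    exact ⟨h1, fun t ht => h2 t.2.1 (List.mem_map.mpr ⟨t, ht, rfl⟩)⟩
  have h1 : pvMinY r rest ≤ s0.2.1 := by
    have hs0mem : s0 ∈ r :: rest := hperm.subset (by simp)
    rcases List.mem_cons.mp hs0mem with h | h
    · rw [h]; exact hlow.1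
    · exact hlow.2 s0 h
  have h2 : s0.2.1 ≤ pvMinY r rest := by
    have : ∃ t ∈ r :: rest, t.2.1 = pvMinY r rest := by
      unfold pvMinY
      rcases pvFoldlMinAttained (rest.map (fun t => t.2.1)) r.2.1 with h | h
      · exact ⟨r, by simp, h.symm ▸ rfl⟩
      · rcases List.mem_map.mp h with ⟨t, ht, hty⟩
        exact ⟨t, by simp [ht], hty⟩
    rcases this with ⟨t, ht, hty⟩
    have : t ∈ s0 :: tS := hperm.symm.subset ht
    have := hs0min t this
    omega
  omega

-- ---- equation lemmas for the while loop ----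

theorem pvAltLoop_nil (i : Int) : pvAltLoop [] i = [] := by rw [pvAltLoop]

theorem pvAltLoop_cons (r : Int × Int × Int × Int) (rest : List (Int × Int × Int × Int)) (i : Int) :
    pvAltLoop (r :: rest) i =
      ((PySem.List.enumerate (PySem.List.sorted2
          ((r :: rest).filter (fun t => decide (t.2.1 - pvMinY r rest < 15)))
          (fun t => t.1) (fun t => t.2.1) false) 0).foldl
        (fun cs q => cs ++ [pvCell i q.1 q.2]) []) ++
      pvAltLoop ((r :: rest).filter (fun t => decide (15 ≤ t.2.1 - pvMinY r rest))) (i + 1) := by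
  rw [pvAltLoop]

-- ---- the main induction: emit rows of the peeled bands = B's while loop ----

theorem pvMain : ∀ (n : Nat) (l : List (Int × Int × Int × Int)) (i : Int), l.length ≤ n →
    pvEmitRows i ((pvRows (pvIsort pvB1 l)).map pvSortX) = pvAltLoop l i := by
  intro n
  induction n with
  | zero =>
    intro l i hl
    cases l with
    | nil => simp [pvIsort, pvRows_nil, pvEmitRows, pvAltLoop_nil]
    | cons r rest => simp at hl
  | succ n ih =>
    intro l i hl
    cases l with
    | nil => simp [pvIsort, pvRows_nil, pvEmitRows, pvAltLoop_nil]
    | cons r rest =>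
      cases hS : pvIsort pvB1 (r :: rest) with
      | nil =>
        exfalso
        have := (pvIsortPerm pvB1 (r :: rest)).length_eq
        rw [hS] at this
        simp at this
      | cons s0 tS =>
        have hm : pvMinY r rest = s0.2.1 := pvMinYHead r rest s0 tS hS
        have hpw : (s0 :: tS).Pairwise (fun p q => pvB1 q p = false) :=
          hS ▸ pvIsortPairwise pvB1_asym pvB1_gap (r :: rest)
        have hpy : (s0 :: tS).Pairwise (fun u w => u.2.1 ≤ w.2.1) :=
          hpw.imp (fun {u w} h => by simp [pvB1] at h; omega)
        have hTD := pvFilterTakeDrop (s0.2.1 + 15) (s0 :: tS) hpy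
        have hrow : (r :: rest).filter (fun t => decide (t.2.1 - pvMinY r rest < 15)) =
            (r :: rest).filter (fun u => decide (u.2.1 < s0.2.1 + 15)) := by
          apply List.filter_congr
          intro t _
          rw [hm]
          exact decide_eq_decide.mpr (by omega)
        have hrest' : (r :: rest).filter (fun t => decide (15 ≤ t.2.1 - pvMinY r rest)) =
            (r :: rest).filter (fun u => !decide (u.2.1 < s0.2.1 + 15)) := by
          apply List.filter_congr
          intro t _
          rw [hm]
          simp only [← decide_not]
          exact decide_eq_decide.mpr (by omega)
        have htake : (s0 :: tS).takeWhile (fun u => decide (u.2.1 < s0.2.1 + 15)) =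
            pvIsort pvB1 ((r :: rest).filter (fun u => decide (u.2.1 < s0.2.1 + 15))) := by
          rw [← hTD.1, ← pvFilterIsort, hS]
        have hdrop : (s0 :: tS).dropWhile (fun u => decide (u.2.1 < s0.2.1 + 15)) =
            pvIsort pvB1 ((r :: rest).filter (fun u => !decide (u.2.1 < s0.2.1 + 15))) := by
          rw [← hTD.2, ← pvFilterIsort, hS]
        have hs0 : (fun u : Int × Int × Int × Int => decide (u.2.1 < s0.2.1 + 15)) s0 = true := by
          simp
        have hlen : ((r :: rest).filter (fun u => !decide (u.2.1 < s0.2.1 + 15))).length ≤ n := by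
          rw [← hrest']
          have h1 := pvRestLen r rest
          have h2 : rest.length ≤ n := by simpa using hl
          omega
        rw [pvRows_cons]
        rw [show s0 :: tS.takeWhile (fun u => decide (u.2.1 < s0.2.1 + 15)) =
            (s0 :: tS).takeWhile (fun u => decide (u.2.1 < s0.2.1 + 15)) from
          (List.takeWhile_cons_of_pos (p := fun u : Int × Int × Int × Int => decide (u.2.1 < s0.2.1 + 15)) (l := tS) hs0).symm]
        rw [show tS.dropWhile (fun u => decide (u.2.1 < s0.2.1 + 15)) =
            (s0 :: tS).dropWhile (fun u => decide (u.2.1 < s0.2.1 + 15)) from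
          (List.dropWhile_cons_of_pos (p := fun u : Int × Int × Int × Int => decide (u.2.1 < s0.2.1 + 15)) (l := tS) hs0).symm]
        rw [htake, hdrop]
        simp only [List.map_cons]
        rw [show pvEmitRows i
              (pvSortX (pvIsort pvB1 ((r :: rest).filter (fun u => decide (u.2.1 < s0.2.1 + 15)))) ::
                (pvRows (pvIsort pvB1 ((r :: rest).filter (fun u => !decide (u.2.1 < s0.2.1 + 15))))).map pvSortX) =
            pvEmitRow i 0 (pvSortX (pvIsort pvB1 ((r :: rest).filter (fun u => decide (u.2.1 < s0.2.1 + 15))))) ++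
              pvEmitRows (i + 1)
                ((pvRows (pvIsort pvB1 ((r :: rest).filter (fun u => !decide (u.2.1 < s0.2.1 + 15))))).map pvSortX)
          from rfl]
        rw [ih _ (i + 1) hlen]
        rw [show pvSortX (pvIsort pvB1 ((r :: rest).filter (fun u => decide (u.2.1 < s0.2.1 + 15)))) =
            pvIsort pvB2 (pvIsort pvB1 ((r :: rest).filter (fun u => decide (u.2.1 < s0.2.1 + 15)))) from rfl]
        rw [pvSortSwap]
        rw [pvAltLoop_cons, pvEmitInner, pvS3_eq, hrow, hrest']
        simp

-- ===== VERDICT (by name: the statement is the Claim_ definition above) =====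
theorem assign_row_col_py_spec : Claim_equal_assign_row_col_py := by
  intro rects _
  unfold Spec_assign_row_col_py assign_row_col_py assign_row_col_py_alt
  by_cases hr : rects = []
  · subst hr
    simp [pvAltLoop_nil]
  · rw [if_neg hr]
    cases hS : PySem.List.sorted2 rects (fun r => r.2.1) (fun r => r.1) false with
    | nil =>
      exfalso
      have := (pvIsortPerm pvB1 rects).length_eq
      rw [← pvS1_eq, hS] at this
      exact hr (List.length_eq_zero_iff.mp this.symm)
    | cons r0 restS =>
      have hS' : pvIsort pvB1 rects = r0 :: restS := by rw [← pvS1_eq, hS]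
      have hpw : (r0 :: restS).Pairwise (fun p q => pvB1 q p = false) :=
        hS' ▸ pvIsortPairwise pvB1_asym pvB1_gap rects
      have hpy : (r0 :: restS).Pairwise (fun u w => u.2.1 ≤ w.2.1) :=
        hpw.imp (fun {u w} h => by simp [pvB1] at h; omega)
      have hA : (PySem.List.enumerate
            ((restS.foldl pvAStep ([], [r0], r0.2.1)).1 ++
              [PySem.List.sorted (restS.foldl pvAStep ([], [r0], r0.2.1)).2.1 (fun r => r.1) false]) 0).foldl
          (fun cells p =>
            (PySem.List.enumerate p.2 0).foldl (fun cs q => cs ++ [pvCell p.1 q.1 q.2]) cells) [] =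
          pvEmitRows 0 ((pvCluster [r0] r0.2.1 restS).map pvSortX) := by
        rw [show (restS.foldl pvAStep ([], [r0], r0.2.1)).1 ++
              [PySem.List.sorted (restS.foldl pvAStep ([], [r0], r0.2.1)).2.1 (fun r => r.1) false] =
            ([] : List (List (Int × Int × Int × Int))) ++ (pvCluster [r0] r0.2.1 restS).map pvSortX from by
          have := pvAFold restS [] [r0] r0.2.1
          simpa [pvSortX] using this]
        rw [pvEmitOuter]
        simp
      change (PySem.List.enumerate
            ((restS.foldl pvAStep ([], [r0], r0.2.1)).1 ++
              [PySem.List.sorted (restS.foldl pvAStep ([], [r0], r0.2.1)).2.1 (fun r => r.1) false]) 0).foldl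
          (fun cells p =>
            (PySem.List.enumerate p.2 0).foldl (fun cs q => cs ++ [pvCell p.1 q.1 q.2]) cells) [] =
          pvAltLoop rects 0
      rw [hA]
      have hcl : pvCluster [r0] r0.2.1 restS = pvRows (r0 :: restS) := by
        rw [pvClusterRows restS [r0] r0.2.1 (List.pairwise_cons.mp hpy).2 (List.pairwise_cons.mp hpy).1,
          pvRows_cons]
        simp
      rw [hcl, ← hS', pvMain rects.length rects 0 le_rfl]
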